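-- pv_equiv track=rewrite | github.com/FourSwordKirby/AIMimic | ExperimentationGame/Bang.py | BangLogToNgram
-- ===== SOURCE A (Python) =====
-- def BangLogToNgram(entries, n = 3):
--     playerNgram = dict()
--     for round in entries:
--         history = [None]*n
--         for action in round:
--             action = int(action[0][8])
--             history.append(action)
--             if(len(history) > n):
--                 history.pop(0)
--             if(not str(history) in playerNgram):
--                 playerNgram[str(history)] = 0
--             playerNgram[str(history)] += 1
--     return playerNgram
-- ===== SOURCE B (Python) =====
-- def BangLogToNgram(entries, n = 3):
--     m = max(n, 0)
--     keys = []
--     for round in entries: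
--         seq = [None] * m + [int(a[0][8]) for a in round]
--         keys.extend(str(seq[j + 1 : j + 1 + m]) for j in range(len(round)))
--     counts = {}
--     for k in keys:
--         counts[k] = counts.get(k, 0) + 1
--     return counts
-- ===== Notes on version B (the rewrite author's own statement) =====
-- stated objective: simpler
-- what changed: Replaces the mutable sliding-window (append/pop(0) with a length guard) and the two-step dict update by first materializing each round's padded action sequence and its fixed-width window keys via index slicing, then tallying all keys in one counting pass with dict.get.
import Mathlib
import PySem

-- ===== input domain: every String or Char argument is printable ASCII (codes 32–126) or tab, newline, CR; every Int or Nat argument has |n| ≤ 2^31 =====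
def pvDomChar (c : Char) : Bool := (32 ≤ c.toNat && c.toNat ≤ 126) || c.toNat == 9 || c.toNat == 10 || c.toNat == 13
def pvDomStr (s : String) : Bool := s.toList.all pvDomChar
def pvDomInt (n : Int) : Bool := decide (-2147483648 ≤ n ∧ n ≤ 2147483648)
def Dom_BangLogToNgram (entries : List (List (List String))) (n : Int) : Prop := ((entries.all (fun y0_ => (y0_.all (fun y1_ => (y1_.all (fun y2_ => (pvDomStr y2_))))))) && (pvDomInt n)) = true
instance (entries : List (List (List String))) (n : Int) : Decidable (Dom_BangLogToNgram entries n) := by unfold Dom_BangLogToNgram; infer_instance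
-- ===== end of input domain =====

-- B materializes each round's padded sequence and slices fixed-width window keys by
-- index, then tallies all keys in one counting pass, instead of A's mutable
-- append/pop(0) sliding window with a two-step dict update (objective: simpler).

-- ===== PORT A =====
-- shared helper: Python's  int(action[0][8])  (both sources contain this very expression)
def pvAct (action : List String) : Int :=
  (PySem.Int.ofChars? [(PySem.Str.pyGet? ((PySem.List.pyGet? action 0).getD "") 8).getD ' ']).getD 0

-- shared helper: Python's str(h) for a list whose elements are None or ints — exact:
-- "[" + ", ".join("None" | repr of the int) + "]"
def pvRepr (h : List (Option Int)) : String :=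
  "[" ++ String.intercalate ", " (h.map (fun x => match x with
    | none => "None"
    | some k => PySem.Int.toStr k)) ++ "]"

def BangLogToNgram (entries : List (List (List String))) (n : Int) : List (String × Int) :=
  (entries.foldl (fun (playerNgram : PySem.Dict String Int) round =>
      (round.foldl (fun (st : List (Option Int) × PySem.Dict String Int) action =>
          let a := pvAct action
          let h1 := st.1 ++ [some a]
          let history := if (h1.length : Int) > n then ((PySem.List.pop? h1 0).map (·.2)).getD h1 else h1
          let d1 := if st.2.contains (pvRepr history) then st.2 else st.2.insert (pvRepr history) 0
          (history, d1.insert (pvRepr history) (d1.getD (pvRepr history) 0 + 1)))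
        (List.replicate n.toNat none, playerNgram)).2)
    PySem.Dict.empty).items

-- ===== PORT B =====
def BangLogToNgram_alt (entries : List (List (List String))) (n : Int) : List (String × Int) :=
  let m : Int := max n 0
  let keys := entries.foldl (fun (ks : List String) round =>
    let seq : List (Option Int) :=
      List.replicate m.toNat none ++ round.map (fun a => some (pvAct a))
    ks ++ (PySem.List.pyRange 0 round.length 1).map
      (fun j => pvRepr (PySem.List.slice seq (some (j + 1)) (some (j + 1 + m))))) []
  (keys.foldl (fun (counts : PySem.Dict String Int) k =>
      counts.insert k (counts.getD k 0 + 1)) PySem.Dict.empty).items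

-- ===== PRECONDITION & SPEC =====
-- Pre_: every action must have a first string with a decimal digit at index 8;
-- otherwise Python A raises (IndexError or ValueError in int()).
def pvOkAction (action : List String) : Bool :=
  match action.head? with
  | none => false
  | some s =>
    match s.toList[8]? with
    | none => false
    | some c => c.isDigit

def Pre_BangLogToNgram (entries : List (List (List String))) (n : Int) : Prop :=
  ∀ round ∈ entries, ∀ action ∈ round, pvOkAction action = true
instance (entries : List (List (List String))) (n : Int) : Decidable (Pre_BangLogToNgram entries n) := by unfold Pre_BangLogToNgram; infer_instance

def pvWitness_BangLogToNgram : List (List (List String)) × Int :=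
  ([[["ABCDEFGH7"], ["ABCDEFGH3"]], [["ABCDEFGH7"]]], 2)

def Spec_BangLogToNgram (entries : List (List (List String))) (n : Int) (out : List (String × Int)) : Prop := out = BangLogToNgram_alt entries n
instance (entries : List (List (List String))) (n : Int) (out : List (String × Int)) : Decidable (Spec_BangLogToNgram entries n out) := by unfold Spec_BangLogToNgram; infer_instance

-- ===== CLAIM (what is proved, stated in full; the proofs are below) =====
def Claim_equal_BangLogToNgram : Prop := ∀ (entries : List (List (List String))) (n : Int), Dom_BangLogToNgram entries n → Pre_BangLogToNgram entries n → Spec_BangLogToNgram entries n (BangLogToNgram entries n)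

-- ===== LEMMAS AND PROOFS =====

-- B's counting step
def pvStep (d : PySem.Dict String Int) (k : String) : PySem.Dict String Int :=
  d.insert k (d.getD k 0 + 1)

-- A's two-step dict update equals B's one-step counting update
theorem pvDictStep (d : PySem.Dict String Int) (k : String) :
    (if d.contains k = true then d else d.insert k 0).insert k
      ((if d.contains k = true then d else d.insert k 0).getD k 0 + 1) = pvStep d k := by
  by_cases h : d.contains k = true
  · simp [h, pvStep]
  · simp only [Bool.not_eq_true] at h
    simp [h, pvStep, PySem.Dict.getD_insert_self, PySem.Dict.insert_insert_self,
      PySem.Dict.getD_of_not_contains (h := h)]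

-- the sequence of keys A's inner loop registers, starting from history h
def pvWF (h : List (Option Int)) : List (List String) → List String
  | [] => []
  | a :: rest =>
    pvRepr ((h ++ [some (pvAct a)]).tail) :: pvWF ((h ++ [some (pvAct a)]).tail) rest

-- pop(0) on a nonempty list is tail
theorem pvPopZero (xs : List (Option Int)) (v : Option Int) :
    ((PySem.List.pop? (xs ++ [v]) 0).map (·.2)).getD (xs ++ [v]) = (xs ++ [v]).tail := by
  cases xs with
  | nil => simp [PySem.List.pop?_zero_cons]
  | cons x t => simp [PySem.List.pop?_zero_cons]

-- A's inner loop, dict component: fold of pvStep over the key sequence pvWF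
theorem pvInner (rest : List (List String)) :
    ∀ (h : List (Option Int)) (d : PySem.Dict String Int) (n : Int), h.length = n.toNat →
    (rest.foldl (fun (st : List (Option Int) × PySem.Dict String Int) action =>
        let a := pvAct action
        let h1 := st.1 ++ [some a]
        let history := if (h1.length : Int) > n then ((PySem.List.pop? h1 0).map (·.2)).getD h1 else h1
        let d1 := if st.2.contains (pvRepr history) then st.2 else st.2.insert (pvRepr history) 0
        (history, d1.insert (pvRepr history) (d1.getD (pvRepr history) 0 + 1)))
      (h, d)).2 = (pvWF h rest).foldl pvStep d := by
  induction rest with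
  | nil => intro h d n _; simp [pvWF]
  | cons a rest ih =>
    intro h d n hlen
    have hgt : ((h ++ [some (pvAct a)]).length : Int) > n := by
      simp [List.length_append, hlen]
    have htail : ((h ++ [some (pvAct a)]).tail).length = n.toNat := by
      simp [List.length_tail, List.length_append, hlen]
    simp only [List.foldl_cons]
    rw [if_pos hgt, pvPopZero, pvDictStep]
    rw [ih _ _ n htail]
    simp [pvWF]

-- pvWF equals the index-sliced windows of the padded sequence
theorem pvWindows (rest : List (List String)) :
    ∀ (h : List (Option Int)) (m : Nat), h.length = m →
    (List.range rest.length).map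
        (fun k => pvRepr (((h ++ rest.map (fun a => some (pvAct a))).drop (k + 1)).take m))
      = pvWF h rest := by
  induction rest with
  | nil => intro h m _; simp [pvWF]
  | cons a rest ih =>
    intro h m hlen
    have hre : h ++ some (pvAct a) :: rest.map (fun a => some (pvAct a))
        = (h ++ [some (pvAct a)]) ++ rest.map (fun a => some (pvAct a)) := List.append_cons h _ _
    have htail : ((h ++ [some (pvAct a)]).tail).length = m := by
      simp [List.length_tail, List.length_append, hlen]
    have hdrop1 : ∀ (j : Nat), (h ++ some (pvAct a) :: rest.map (fun a => some (pvAct a))).drop (j + 1)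
        = ((h ++ [some (pvAct a)]).tail ++ rest.map (fun a => some (pvAct a))).drop j := by
      intro j
      rw [hre]
      rw [show j + 1 = 1 + j by omega, ← List.drop_drop]
      congr 1
      rw [List.drop_one, List.tail_append_of_ne_nil]
      simp
    simp only [List.length_cons, List.range_succ_eq_map, List.map_cons, pvWF]
    congr 1
    · rw [hdrop1 0, List.drop_zero, List.take_left' htail]
    · rw [← ih ((h ++ [some (pvAct a)]).tail) m htail, List.map_map]
      apply List.map_congr_left
      intro k _
      simp only [Function.comp_apply, Nat.succ_eq_add_one]
      rw [hdrop1 (k + 1)]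

-- B's per-round key list equals pvWF from the fresh history
theorem pvRoundKeys (round : List (List String)) (n : Int) :
    (PySem.List.pyRange 0 round.length 1).map
        (fun j => pvRepr (PySem.List.slice
          (List.replicate (max n 0).toNat none ++ round.map (fun a => some (pvAct a)))
          (some (j + 1)) (some (j + 1 + max n 0))))
      = pvWF (List.replicate n.toNat none) round := by
  have hm : (max n 0).toNat = n.toNat := by omega
  have hmc : max n 0 = ((n.toNat : Nat) : Int) := by omega
  rw [← pvWindows round (List.replicate n.toNat none) n.toNat (by simp)]
  rw [PySem.List.pyRange_one]
  simp only [Int.sub_zero, Int.toNat_natCast, List.map_map]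
  apply List.map_congr_left
  intro k _
  simp only [Function.comp_apply, Int.zero_add, hm]
  congr 1
  have : (↑k + 1 : Int) = ((k + 1 : Nat) : Int) := by push_cast; ring
  rw [hmc, this, PySem.List.slice_natCast_add]

-- outer loop: A's dict fold equals B's counting fold over the concatenated keys
theorem pvOuterFold (n : Int) (entries : List (List (List String))) :
    ∀ (d : PySem.Dict String Int),
    entries.foldl (fun (playerNgram : PySem.Dict String Int) round =>
      (round.foldl (fun (st : List (Option Int) × PySem.Dict String Int) action =>
          let a := pvAct action
          let h1 := st.1 ++ [some a]
          let history := if (h1.length : Int) > n then ((PySem.List.pop? h1 0).map (·.2)).getD h1 else h1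
          let d1 := if st.2.contains (pvRepr history) then st.2 else st.2.insert (pvRepr history) 0
          (history, d1.insert (pvRepr history) (d1.getD (pvRepr history) 0 + 1)))
        (List.replicate n.toNat none, playerNgram)).2) d
    = (entries.flatMap (fun round => pvWF (List.replicate n.toNat none) round)).foldl pvStep d := by
  induction entries with
  | nil => intro d; simp
  | cons r rest ih =>
    intro d
    simp only [List.foldl_cons, List.flatMap_cons, List.foldl_append]
    rw [ih, pvInner r (List.replicate n.toNat none) d n (by simp)]

theorem pvMain (entries : List (List (List String))) (n : Int) :
    BangLogToNgram entries n = BangLogToNgram_alt entries n := by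
  unfold BangLogToNgram BangLogToNgram_alt
  congr 1
  rw [pvOuterFold n entries PySem.Dict.empty]
  have hkeys : entries.foldl (fun (ks : List String) round =>
      ks ++ (PySem.List.pyRange 0 round.length 1).map
        (fun j => pvRepr (PySem.List.slice
          (List.replicate (max n 0).toNat none ++ round.map (fun a => some (pvAct a)))
          (some (j + 1)) (some (j + 1 + max n 0))))) []
    = entries.flatMap (fun round => pvWF (List.replicate n.toNat none) round) := by
    rw [PySem.List.foldl_append_eq_flatMap]
    simp only [List.nil_append]
    exact congrArg (fun f => List.flatMap f entries) (funext fun r => pvRoundKeys r n)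
  rw [hkeys]
  rfl

-- ===== VERDICT (by name: the statement is the Claim_ definition above) =====
theorem BangLogToNgram_spec : Claim_equal_BangLogToNgram := by
  intro entries n _ _
  unfold Spec_BangLogToNgram
  exact pvMain entries n
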